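-- pv_equiv track=rewrite | github.com/skyler-saville/jukebotx-service-full | packages/infra/jukebotx_infra/suno/client.py | _looks_like_next_f_plumbing
-- ===== SOURCE A (Python) =====
-- def _looks_like_next_f_plumbing(text: str) -> bool:
--     """
--     Hard reject obvious RSC/Next.js plumbing fragments that are not lyrics.
--
--     This is necessary because those fragments can contain lots of \\n and moderate
--     line lengths, which can fool scoring heuristics.
--     """
--     lowered = text.lower()
--     bad = (
--         "$sreact.fragment",
--         "metadataboundary",
--         "viewportboundary",
--         "outletboundary",
--         "asyncmetadataoutlet",
--         "static/chunks",
--         "webpack",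
--         "__next",
--         "react-dom",
--         "chunk",
--         "manifest",
--     )
--     return any(b in lowered for b in bad)
-- ===== SOURCE B (Python) =====
-- _BAD = (
--     "$sreact.fragment",
--     "metadataboundary",
--     "viewportboundary",
--     "outletboundary",
--     "asyncmetadataoutlet",
--     "static/chunks",
--     "webpack",
--     "__next",
--     "react-dom",
--     "chunk",
--     "manifest",
-- )
--
--
-- def _looks_like_next_f_plumbing(text: str) -> bool:
--     # Single forward scan: at each position, test whether some bad fragment
--     # starts right there, instead of one full `in` scan per fragment.
--     lowered = text.lower()
--     while lowered:
--         for b in _BAD: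
--             if lowered.startswith(b):
--                 return True
--         lowered = lowered[1:]
--     return False
-- ===== Notes on version B (the rewrite author's own statement) =====
-- stated objective: alternative
-- what changed: Replaces A's per-pattern full substring scans (`any(b in lowered)`) by a single left-to-right scan of the text that at each suffix checks whether any bad fragment is a prefix there.
import Mathlib
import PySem

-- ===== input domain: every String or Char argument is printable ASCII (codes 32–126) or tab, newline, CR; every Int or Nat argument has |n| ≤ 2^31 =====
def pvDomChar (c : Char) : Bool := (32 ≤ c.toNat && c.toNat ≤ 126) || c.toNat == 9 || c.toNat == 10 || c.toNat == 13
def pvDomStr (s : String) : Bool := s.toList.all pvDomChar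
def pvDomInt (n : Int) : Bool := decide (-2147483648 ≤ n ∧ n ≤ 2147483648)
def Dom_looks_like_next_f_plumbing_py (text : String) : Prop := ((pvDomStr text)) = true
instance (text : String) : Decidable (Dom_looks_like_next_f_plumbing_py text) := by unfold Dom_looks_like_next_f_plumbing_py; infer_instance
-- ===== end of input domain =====

-- B changes the traversal: one forward scan testing each bad fragment as a prefix of every
-- suffix, instead of A's one full `in` substring scan per fragment (objective: alternative).

-- ===== PORT A =====
def pvBadA : List String :=
  ["$sreact.fragment", "metadataboundary", "viewportboundary", "outletboundary",
   "asyncmetadataoutlet", "static/chunks", "webpack", "__next", "react-dom",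
   "chunk", "manifest"]

def looks_like_next_f_plumbing_py (text : String) : Bool :=
  let lowered := PySem.Str.lower text
  pvBadA.any (fun b => PySem.Chars.isIn b.toList lowered.toList)

-- ===== PORT B =====
def pvBadB : List (List Char) :=
  ["$sreact.fragment".toList, "metadataboundary".toList, "viewportboundary".toList,
   "outletboundary".toList, "asyncmetadataoutlet".toList, "static/chunks".toList,
   "webpack".toList, "__next".toList, "react-dom".toList, "chunk".toList, "manifest".toList]

-- the `while lowered:` loop of Source B: recursion over the suffixes of the lowered text
def pvAltScan : List Char → Bool
  | [] => false
  | c :: rest =>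
    if pvBadB.any (fun b => PySem.Chars.startswith (c :: rest) b) then true
    else pvAltScan rest

def looks_like_next_f_plumbing_py_alt (text : String) : Bool :=
  let lowered := PySem.Str.lower text
  pvAltScan lowered.toList

-- ===== PRECONDITION & SPEC =====
def Spec_looks_like_next_f_plumbing_py (text : String) (out : Bool) : Prop := out = looks_like_next_f_plumbing_py_alt text
instance (text : String) (out : Bool) : Decidable (Spec_looks_like_next_f_plumbing_py text out) := by unfold Spec_looks_like_next_f_plumbing_py; infer_instance

-- ===== CLAIM (what is proved, stated in full; the proofs are below) =====
def Claim_equal_looks_like_next_f_plumbing_py : Prop := ∀ (text : String), Dom_looks_like_next_f_plumbing_py text → Spec_looks_like_next_f_plumbing_py text (looks_like_next_f_plumbing_py text)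

-- ===== LEMMAS AND PROOFS =====

-- B's scan finds exactly the bad fragments occurring as an infix
lemma pvAltScan_iff (l : List Char) :
    pvAltScan l = true ↔ ∃ b ∈ pvBadB, b <:+: l := by
  induction l with
  | nil =>
    simp only [pvAltScan, List.infix_nil]
    constructor
    · intro h; exact absurd h (by decide)
    · rintro ⟨b, hb, rfl⟩; revert hb; decide
  | cons c rest ih =>
    simp only [pvAltScan]
    split
    · rename_i h
      simp only [List.any_eq_true, PySem.Chars.startswith_iff] at h
      obtain ⟨b, hb, hpre⟩ := h
      exact iff_of_true rfl ⟨b, hb, hpre.isInfix⟩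
    · rename_i h
      simp only [List.any_eq_true, PySem.Chars.startswith_iff, not_exists, not_and] at h
      rw [ih]
      constructor
      · rintro ⟨b, hb, hinf⟩; exact ⟨b, hb, hinf.trans (List.suffix_cons c rest).isInfix⟩
      · rintro ⟨b, hb, hinf⟩
        rcases List.infix_cons_iff.mp hinf with hpre | hinf'
        · exact absurd hpre (h b hb)
        · exact ⟨b, hb, hinf'⟩

lemma pvBadB_eq : pvBadB = pvBadA.map String.toList := by decide

-- ===== VERDICT (by name: the statement is the Claim_ definition above) =====
theorem looks_like_next_f_plumbing_py_spec : Claim_equal_looks_like_next_f_plumbing_py := by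
  intro text _
  show looks_like_next_f_plumbing_py text = looks_like_next_f_plumbing_py_alt text
  simp only [looks_like_next_f_plumbing_py, looks_like_next_f_plumbing_py_alt]
  rw [Bool.eq_iff_iff, pvAltScan_iff]
  simp only [List.any_eq_true, PySem.Chars.isIn_iff_infix, pvBadB_eq, List.mem_map]
  constructor
  · rintro ⟨b, hb, hinf⟩; exact ⟨b.toList, ⟨b, hb, rfl⟩, hinf⟩
  · rintro ⟨_, ⟨b, hb, rfl⟩, hinf⟩; exact ⟨b, hb, hinf⟩
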